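-- pv_equiv track=rewrite | github.com/cvr-bhupalreddy/dsa-python-2025 | DSA/DP/DP_MCM/7.PartitionArray_Max_Sum.py | maxSumTabForward
-- ===== SOURCE A (Python) =====
-- from typing import List
--
-- def maxSumTabForward(arr: List[int], k: int) -> int:
--     n = len(arr)
--     dp = [0] * (n+1)   # dp[n] = 0
--
--     for i in range(n-1, -1, -1):
--         curr_max = 0
--         best = 0
--         for l in range(1, k+1):
--             if i + l > n:
--                 break
--             curr_max = max(curr_max, arr[i+l-1])
--             best = max(best, curr_max*l + dp[i+l])
--         dp[i] = best
--
--     return dp[0]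
-- ===== SOURCE B (Python) =====
-- def maxSumTabForward(arr, k):
--     # Top-down demand-driven memoization: best(i) for the suffix arr[i:] is
--     # computed on demand via an explicit work stack (no recursion-depth limit),
--     # with a memo dict instead of A's pre-sized bottom-up table.
--     n = len(arr)
--     memo = {n: 0}
--     stack = [0]
--     while stack:
--         i = stack.pop()
--         if i in memo:
--             continue
--         if i + 1 not in memo:
--             # dependencies not ready yet: revisit i after solving i+1
--             stack.append(i)
--             stack.append(i + 1)
--             continue
--         cm = 0
--         best = 0
--         l = 1
--         while l <= k and i + l <= n:
--             v = arr[i + l - 1]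
--             if v > cm:
--                 cm = v
--             c = cm * l + memo[i + l]
--             if c > best:
--                 best = c
--             l += 1
--         memo[i] = best
--     return memo[0]
-- ===== Notes on version B (the rewrite author's own statement) =====
-- stated objective: alternative
-- what changed: B replaces A's bottom-up tabulation over a pre-sized dp array by top-down demand-driven memoization: a memo dict plus an explicit work stack that solves suffix states on demand, with plain comparisons instead of per-element max() builtin calls.
import Mathlib
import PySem

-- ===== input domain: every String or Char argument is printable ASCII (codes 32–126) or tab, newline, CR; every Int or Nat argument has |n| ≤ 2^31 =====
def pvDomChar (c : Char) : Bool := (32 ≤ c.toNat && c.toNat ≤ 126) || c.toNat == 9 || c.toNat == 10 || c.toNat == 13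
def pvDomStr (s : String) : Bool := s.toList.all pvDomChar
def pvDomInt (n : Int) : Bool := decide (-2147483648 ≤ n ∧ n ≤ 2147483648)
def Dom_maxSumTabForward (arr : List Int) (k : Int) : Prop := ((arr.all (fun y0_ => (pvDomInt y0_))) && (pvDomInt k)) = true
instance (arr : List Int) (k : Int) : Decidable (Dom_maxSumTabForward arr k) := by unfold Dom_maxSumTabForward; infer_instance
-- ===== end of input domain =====

-- B replaces A's bottom-up tabulation over a pre-sized dp array by top-down
-- demand-driven memoization (a memo dict plus an explicit work stack).

-- ===== PORT A =====
-- inner loop 'for l in range(1, k+1): if i+l > n: break; …' transliterated as recursion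
-- on l (the range is not materialised because the break bounds it by n-i; the recursion
-- stops exactly when the range is exhausted (l > k) or the break fires (i+l > n)).
def innerA (arr : List Int) (n : Nat) (dp : List Int) (i k l curr best : Int) : Int :=
  if l > k then best
  else if i + l > (n : Int) then best
  else
    -- arr[i+l-1]: always in range here (0 ≤ i, 1 ≤ l, i+l ≤ n), so getD 0 is exact
    let curr' := max curr ((PySem.List.pyGet? arr (i + l - 1)).getD 0)
    -- dp[i+l]: always in range (i+l ≤ n, len dp = n+1)
    let best' := max best (curr' * l + (PySem.List.pyGet? dp (i + l)).getD 0)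
    innerA arr n dp i k (l + 1) curr' best'
termination_by ((n : Int) + 1 - (i + l)).toNat
decreasing_by omega

def maxSumTabForward (arr : List Int) (k : Int) : Int :=
  let n := arr.length
  let dp0 := List.replicate (n + 1) (0 : Int)
  let dp := (PySem.List.pyRange ((n : Int) - 1) (-1) (-1)).foldl
    (fun d i => d.set i.toNat (innerA arr n d i k 1 0 0)) dp0
  -- dp[0]: always in range (len dp = n+1 ≥ 1)
  (PySem.List.pyGet? dp 0).getD 0

-- ===== PORT B =====
-- Source B's inner 'while l <= k and i + l <= n: …' loop, step for step
def innerB (arr : List Int) (n : Int) (memo : PySem.Dict Int Int) (i k l cm best : Int) : Int :=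
  if l ≤ k ∧ i + l ≤ n then
    -- arr[i+l-1]: always in range here (0 ≤ i, 1 ≤ l, i+l ≤ n), getD 0 exact
    let v := (PySem.List.pyGet? arr (i + l - 1)).getD 0
    let cm' := if v > cm then v else cm
    -- memo[i+l]: always present (see the invariant comment on loopB), getD 0 exact
    let c := cm' * l + memo.getD (i + l) 0
    let best' := if c > best then c else best
    innerB arr n memo i k (l + 1) cm' best'
  else best
termination_by (n + 1 - (i + l)).toNat
decreasing_by omega

-- Source B's 'while stack:' loop. A state i is solved only after i+1 is memoized, so every
-- memo[i+l] read by innerB is present. The fuel only makes the loop total in Lean: the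
-- machine pushes each of the n states at most once and pops at most 2n+2 times, so a
-- fuel of 2n+2 is never exhausted (the equivalence proof below runs within it).
def loopB (arr : List Int) (n k : Int) : Nat → PySem.Dict Int Int → List Int → PySem.Dict Int Int
  | 0, memo, _ => memo
  | _ + 1, memo, [] => memo
  | fuel + 1, memo, i :: rest =>
    if memo.contains i then loopB arr n k fuel memo rest
    else if ¬ memo.contains (i + 1) then loopB arr n k fuel memo ((i + 1) :: i :: rest)
    else loopB arr n k fuel (memo.insert i (innerB arr n memo i k 1 0 0)) rest

def maxSumTabForward_alt (arr : List Int) (k : Int) : Int :=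
  let n : Int := arr.length
  let memo := (PySem.Dict.empty : PySem.Dict Int Int).insert n 0   -- {n: 0}
  let final := loopB arr n k (2 * arr.length + 2) memo [0]
  -- memo[0]: present when the loop ends, getD 0 exact
  final.getD 0 0

-- ===== PRECONDITION & SPEC =====
def Spec_maxSumTabForward (arr : List Int) (k : Int) (out : Int) : Prop := out = maxSumTabForward_alt arr k
instance (arr : List Int) (k : Int) (out : Int) : Decidable (Spec_maxSumTabForward arr k out) := by unfold Spec_maxSumTabForward; infer_instance

-- ===== CLAIM (what is proved, stated in full; the proofs are below) =====
def Claim_equal_maxSumTabForward : Prop := ∀ (arr : List Int) (k : Int), Dom_maxSumTabForward arr k → Spec_maxSumTabForward arr k (maxSumTabForward arr k)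

-- ===== LEMMAS AND PROOFS =====

-- proof-side step function used only to define the ghost table
def innerStepB (dps : List Int) (a : Int × Int × Int) (v : Int) : Int × Int × Int :=
  let l := a.1 + 1
  let m := if v > a.2.1 then v else a.2.1
  let c := m * l + (PySem.List.pyGet? dps (l - 1)).getD 0
  let best := if c > a.2.2 then c else a.2.2
  (l, m, best)

-- proof-side ghost table: ghostG arr k m = [dp(n-m), dp(n-m+1), ..., dp(n)]
def ghostG (arr : List Int) (k : Int) : Nat → List Int
  | 0 => [0]
  | m + 1 =>
    let prev := ghostG arr k m
    (((arr.drop (arr.length - (m + 1))).take k.toNat).foldl (innerStepB prev) (0, 0, 0)).2.2 :: prev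

-- proof-side: A's countdown fold as recursion on the number of indices left
def outerRec (f : List Int → Int → List Int) : Nat → List Int → List Int
  | 0, d => d
  | m + 1, d => outerRec f m (f d (m : Int))

-- proof-side: B's memo after the initial {n:0} plus m computed states n-1, …, n-m
def memoM (arr : List Int) (k : Int) : Nat → PySem.Dict Int Int
  | 0 => (PySem.Dict.empty : PySem.Dict Int Int).insert (arr.length : Int) 0
  | m + 1 => (memoM arr k m).insert ((arr.length : Int) - (m + 1)) ((ghostG arr k (m + 1)).headD 0)

-- proof-side: B's work stack [c-1, c-2, …, 0] (top first)
def stackOf : Nat → List Int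
  | 0 => []
  | c + 1 => (c : Int) :: stackOf c

theorem length_ghostG (arr : List Int) (k : Int) (m : Nat) : (ghostG arr k m).length = m + 1 := by
  induction m with
  | zero => rfl
  | succ m ih => simp [ghostG, ih]

theorem pyRange_fold (f : List Int → Int → List Int) (m : Nat) (d : List Int) :
    (PySem.List.pyRange ((m : Int) - 1) (-1) (-1)).foldl f d = outerRec f m d := by
  induction m generalizing d with
  | zero => rw [PySem.List.pyRange_neg_one_eq_nil (by omega)]; rfl
  | succ m ih =>
      rw [show ((m + 1 : Nat) : Int) - 1 = (m : Int) by push_cast; omega,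
        PySem.List.pyRange_neg_one_cons (by omega)]
      simp only [List.foldl_cons]
      exact ih (f d (m : Int))

theorem set_append_len (l1 : List Int) (x : Int) (l2 : List Int) (v : Int) :
    (l1 ++ x :: l2).set l1.length v = l1 ++ v :: l2 := by
  induction l1 with
  | nil => rfl
  | cons a l ih => simp [ih]

theorem set_append_len' (l1 : List Int) (x : Int) (l2 : List Int) (v : Int) (n : Nat)
    (h : n = l1.length) : (l1 ++ x :: l2).set n v = l1 ++ v :: l2 := by
  subst h; exact set_append_len l1 x l2 v

theorem ifgt_eq_max (c v : Int) : (if v > c then v else c) = max c v := by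
  by_cases h : v > c
  · simp [if_pos h, max_eq_right (le_of_lt h)]
  · simp [if_neg h, max_eq_left (not_lt.mp h)]

-- the heart of the A side: A's inner loop = the ghost fold, over the ghost dp-suffix table
theorem innerA_eq_fold (arr : List Int) (k : Int) (hk : 1 ≤ k) (i m : Nat)
    (him : i + m + 1 = arr.length) :
    ∀ (j : Nat) (curr best : Int), j ≤ ((arr.drop i).take k.toNat).length →
    innerA arr arr.length (List.replicate (i + 1) 0 ++ ghostG arr k m) (i : Int) k ((j : Int) + 1) curr best
      = ((((arr.drop i).take k.toNat).drop j).foldl (innerStepB (ghostG arr k m)) ((j : Int), curr, best)).2.2 := by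
  have hlen : ((arr.drop i).take k.toNat).length = min k.toNat (m + 1) := by
    simp only [List.length_take, List.length_drop]; omega
  suffices H : ∀ (t j : Nat) (curr best : Int), ((arr.drop i).take k.toNat).length - j = t →
      j ≤ ((arr.drop i).take k.toNat).length →
      innerA arr arr.length (List.replicate (i + 1) 0 ++ ghostG arr k m) (i : Int) k ((j : Int) + 1) curr best
        = ((((arr.drop i).take k.toNat).drop j).foldl (innerStepB (ghostG arr k m)) ((j : Int), curr, best)).2.2 by
    intro j curr best hj; exact H _ j curr best rfl hj
  intro t
  induction t with
  | zero =>
    intro j curr best ht hj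
    have hj' : j = ((arr.drop i).take k.toNat).length := by omega
    rw [hj', List.drop_length, List.foldl_nil]
    rw [innerA]
    by_cases h1 : ((((arr.drop i).take k.toNat).length : Int) + 1) > k
    · rw [if_pos h1]
    · rw [if_neg h1, if_pos (by rw [hlen] at h1 ⊢; push_cast at h1 ⊢; omega)]
  | succ t ih =>
    intro j curr best ht hj
    have hjv : j < ((arr.drop i).take k.toNat).length := by omega
    have hij : i + j < arr.length := by rw [hlen] at hjv; omega
    have hjm : j < m + 1 := by rw [hlen] at hjv; omega
    rw [List.drop_eq_getElem_cons hjv, List.foldl_cons]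
    have hvj : ((arr.drop i).take k.toNat)[j] = arr[i + j] := by
      simp [List.getElem_take, List.getElem_drop]
    rw [innerA]
    rw [if_neg (by rw [hlen] at hjv; omega),
        if_neg (by rw [hlen] at hjv; omega)]
    have harr : (PySem.List.pyGet? arr ((i : Int) + ((j : Int) + 1) - 1)).getD 0 = arr[i + j] := by
      rw [show ((i : Int) + ((j : Int) + 1) - 1) = (((i + j : Nat) : Nat) : Int) by push_cast; omega,
        PySem.List.pyGet?_natCast, List.getElem?_eq_getElem hij]
      rfl
    have hdp : (PySem.List.pyGet? (List.replicate (i + 1) 0 ++ ghostG arr k m) ((i : Int) + ((j : Int) + 1))).getD 0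
        = (ghostG arr k m)[j]'(by rw [length_ghostG]; omega) := by
      rw [show ((i : Int) + ((j : Int) + 1)) = (((i + 1 + j : Nat) : Nat) : Int) by omega,
        PySem.List.pyGet?_natCast]
      rw [show (i + 1 + j) = (List.replicate (i + 1) (0 : Int)).length + j by simp]
      rw [List.getElem?_append_right (by simp)]
      simp only [List.length_replicate, Nat.add_sub_cancel_left]
      rw [List.getElem?_eq_getElem (by rw [length_ghostG]; omega)]
      rfl
    simp only [harr]
    have hstep : innerStepB (ghostG arr k m) ((j : Int), curr, best) (((arr.drop i).take k.toNat)[j])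
        = (((j + 1 : Nat) : Int), max curr arr[i + j],
            max best (max curr arr[i + j] * ((j : Int) + 1)
              + (ghostG arr k m)[j]'(by rw [length_ghostG]; omega))) := by
      simp only [innerStepB, hvj]
      rw [show ((j : Int) + 1 - 1) = (((j : Nat) : Nat) : Int) by omega,
        PySem.List.pyGet?_natCast, List.getElem?_eq_getElem (by rw [length_ghostG]; omega)]
      rw [ifgt_eq_max, ifgt_eq_max]
      simp only [Option.getD_some]
      push_cast
      rfl
    rw [hstep, hdp]
    have := ih (j + 1) (max curr arr[i + j])
      (max best (max curr arr[i + j] * ((j : Int) + 1) + (ghostG arr k m)[j]'(by rw [length_ghostG]; omega)))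
      (by omega) (by omega)
    rw [show ((j : Int) + 1 + 1) = (((j + 1 : Nat) : Int) + 1) by push_cast; ring] at *
    exact this

-- the value A's inner loop computes at state i is the head of the next ghost table (all k)
theorem innerA_val (arr : List Int) (k : Int) (i m : Nat) (him : i + m + 1 = arr.length) :
    innerA arr arr.length (List.replicate (i + 1) 0 ++ ghostG arr k m) (i : Int) k 1 0 0
      = (ghostG arr k (m + 1)).headD 0 := by
  by_cases hk : 1 ≤ k
  · have h0 := innerA_eq_fold arr k hk i m him 0 0 0 (by omega)
    simp only [Nat.cast_zero, zero_add, List.drop_zero] at h0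
    rw [h0]
    simp only [ghostG, show arr.length - (m + 1) = i by omega, List.headD_cons]
  · rw [innerA, if_pos (by omega)]
    have hkt : k.toNat = 0 := by omega
    simp [ghostG, hkt]

-- one outer step of A, on the ghost table
theorem A_step (arr : List Int) (k : Int) (m : Nat) (hm : m < arr.length) :
    (List.replicate (arr.length - m) 0 ++ ghostG arr k m).set (arr.length - m - 1)
        (innerA arr arr.length (List.replicate (arr.length - m) 0 ++ ghostG arr k m)
          ((arr.length - m - 1 : Nat) : Int) k 1 0 0)
      = List.replicate (arr.length - m - 1) 0 ++ ghostG arr k (m + 1) := by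
  have him : (arr.length - m - 1) + m + 1 = arr.length := by omega
  have e1 : List.replicate (arr.length - m) (0 : Int) ++ ghostG arr k m
      = List.replicate (arr.length - m - 1) 0 ++ 0 :: ghostG arr k m := by
    rw [show arr.length - m = arr.length - m - 1 + 1 by omega, List.replicate_succ',
      List.append_assoc, List.singleton_append]
    simp
  have e2 : List.replicate (arr.length - m - 1) (0 : Int) ++ 0 :: ghostG arr k m
      = List.replicate (arr.length - m - 1 + 1) 0 ++ ghostG arr k m := by
    rw [List.replicate_succ', List.append_assoc, List.singleton_append]
  have hval := innerA_val arr k (arr.length - m - 1) m him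
  rw [← e2] at hval
  rw [e1, hval, set_append_len' _ _ _ _ _ (by simp)]
  have hcons : (ghostG arr k (m + 1)).headD 0 :: ghostG arr k m = ghostG arr k (m + 1) := by
    simp only [ghostG, List.headD_cons]
  rw [hcons]

-- A's whole outer loop, on the ghost table
theorem A_run (arr : List Int) (k : Int) :
    ∀ (j : Nat), j ≤ arr.length →
    outerRec (fun d i => d.set i.toNat (innerA arr arr.length d i k 1 0 0)) j
        (List.replicate j 0 ++ ghostG arr k (arr.length - j))
      = ghostG arr k arr.length := by
  intro j
  induction j with
  | zero => intro _; simp [outerRec]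
  | succ j ih =>
    intro hj
    simp only [outerRec, Int.toNat_natCast]
    have hstep := A_step arr k (arr.length - (j + 1)) (by omega)
    rw [show arr.length - (arr.length - (j + 1)) = j + 1 by omega] at hstep
    simp only [Nat.add_sub_cancel] at hstep
    rw [show arr.length - (j + 1) + 1 = arr.length - j by omega] at hstep
    rw [hstep]
    exact ih (by omega)

-- A returns the head of the full ghost table
theorem A_result (arr : List Int) (k : Int) :
    maxSumTabForward arr k = (ghostG arr k arr.length).headD 0 := by
  show (PySem.List.pyGet? ((PySem.List.pyRange ((arr.length : Int) - 1) (-1) (-1)).foldl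
      (fun d i => d.set i.toNat (innerA arr arr.length d i k 1 0 0))
      (List.replicate (arr.length + 1) 0)) 0).getD 0 = _
  rw [pyRange_fold]
  have hA : outerRec (fun d i => d.set i.toNat (innerA arr arr.length d i k 1 0 0)) arr.length
      (List.replicate (arr.length + 1) 0) = ghostG arr k arr.length := by
    have := A_run arr k arr.length (le_refl _)
    rw [show arr.length - arr.length = 0 by omega] at this
    rw [show (List.replicate (arr.length + 1) (0 : Int)) = List.replicate arr.length 0 ++ ghostG arr k 0 by
      rw [List.replicate_succ']; rfl]
    exact this
  rw [hA]
  obtain ⟨g, rest, hG⟩ : ∃ g rest, ghostG arr k arr.length = g :: rest := by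
    cases h : ghostG arr k arr.length with
    | nil => have := length_ghostG arr k arr.length; rw [h] at this; simp at this
    | cons g rest => exact ⟨g, rest, rfl⟩
  rw [hG, PySem.List.pyGet?_zero_cons]
  rfl

-- ===== B-side lemmas =====

-- keys of memoM m are exactly n-m..n
theorem contains_memoM (arr : List Int) (k : Int) (m : Nat) (j : Int) :
    (memoM arr k m).contains j = decide ((arr.length : Int) - m ≤ j ∧ j ≤ (arr.length : Int)) := by
  induction m with
  | zero =>
    simp only [memoM, PySem.Dict.contains_insert, PySem.Dict.contains_empty, Bool.or_false]
    rw [Bool.eq_iff_iff]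
    simp only [beq_iff_eq, decide_eq_true_eq]
    push_cast
    omega
  | succ m ih =>
    simp only [memoM, PySem.Dict.contains_insert, ih]
    rw [Bool.eq_iff_iff]
    simp only [beq_iff_eq, Bool.or_eq_true, decide_eq_true_eq]
    push_cast
    omega

-- values of memoM m are the ghost heads
theorem getD_memoM (arr : List Int) (k : Int) (m : Nat) (j : Nat)
    (h1 : arr.length - m ≤ j) (h2 : j ≤ arr.length) :
    (memoM arr k m).getD (j : Int) 0 = (ghostG arr k (arr.length - j)).headD 0 := by
  induction m with
  | zero =>
    have hj : j = arr.length := by omega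
    subst hj
    simp [memoM, ghostG]
  | succ m ih =>
    simp only [memoM, PySem.Dict.getD_insert]
    by_cases h : (j : Int) = (arr.length : Int) - (m + 1)
    · have hj : j = arr.length - (m + 1) := by omega
      rw [if_pos h, hj, show arr.length - (arr.length - (m + 1)) = m + 1 by omega]
    · rw [if_neg h]
      exact ih (by omega)

-- indexing into the ghost table gives the corresponding ghost head
theorem ghostG_getElem? (arr : List Int) (k : Int) (m t : Nat) (ht : t ≤ m) :
    (ghostG arr k m)[t]? = some ((ghostG arr k (m - t)).headD 0) := by
  induction m generalizing t with
  | zero =>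
    have : t = 0 := by omega
    subst this
    rfl
  | succ m ih =>
    cases t with
    | zero => simp only [ghostG]; rw [List.getElem?_cons_zero, List.headD_cons]
    | succ t =>
      have : (ghostG arr k (m + 1))[t + 1]? = (ghostG arr k m)[t]? := by
        simp only [ghostG]; rw [List.getElem?_cons_succ]
      rw [this, ih t (by omega), show m + 1 - (t + 1) = m - t by omega]

-- B's inner loop equals A's inner loop when memo agrees with the dp list above i
theorem innerB_eq_innerA (arr : List Int) (memo : PySem.Dict Int Int) (dp : List Int)
    (i k : Int) (n : Nat) (hi : 0 ≤ i)
    (hmem : ∀ j : Nat, i < (j : Int) → (j : Int) ≤ (n : Int) →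
      memo.getD (j : Int) 0 = (PySem.List.pyGet? dp (j : Int)).getD 0) :
    ∀ (l cm best : Int), 1 ≤ l →
    innerB arr (n : Int) memo i k l cm best = innerA arr n dp i k l cm best := by
  suffices H : ∀ (t : Nat) (l cm best : Int), 1 ≤ l → ((n : Int) + 1 - (i + l)).toNat = t →
      innerB arr (n : Int) memo i k l cm best = innerA arr n dp i k l cm best by
    intro l cm best hl; exact H _ l cm best hl rfl
  intro t
  induction t with
  | zero =>
    intro l cm best hl ht
    rw [innerB, if_neg (by omega), innerA]
    by_cases hlk : l > k
    · rw [if_pos hlk]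
    · rw [if_neg hlk, if_pos (by omega)]
  | succ t ih =>
    intro l cm best hl ht
    rw [innerB, innerA]
    by_cases hlk : l > k
    · rw [if_neg (by omega), if_pos hlk]
    · rw [if_pos ⟨by omega, by omega⟩, if_neg hlk, if_neg (by omega)]
      obtain ⟨j, hj⟩ : ∃ j : Nat, (j : Int) = i + l := ⟨(i + l).toNat, by omega⟩
      have hmv := hmem j (by omega) (by omega)
      rw [hj] at hmv
      simp only [ifgt_eq_max, hmv]
      exact ih (l + 1) _ _ (by omega) (by omega)

-- one compute step of the machine: solving state c extends memoM
theorem B_compute (arr : List Int) (k : Int) (c : Nat) (hc : c + 1 ≤ arr.length) :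
    (memoM arr k (arr.length - c - 1)).insert (c : Int)
        (innerB arr (arr.length : Int) (memoM arr k (arr.length - c - 1)) (c : Int) k 1 0 0)
      = memoM arr k (arr.length - c) := by
  set m := arr.length - c - 1 with hm
  have hmem : ∀ j : Nat, (c : Int) < (j : Int) → (j : Int) ≤ (arr.length : Int) →
      (memoM arr k m).getD (j : Int) 0
        = (PySem.List.pyGet? (List.replicate (c + 1) 0 ++ ghostG arr k m) (j : Int)).getD 0 := by
    intro j hj1 hj2
    have hj1' : c < j := by omega
    have hj2' : j ≤ arr.length := by omega
    rw [getD_memoM arr k m j (by omega) hj2']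
    rw [show ((j : Nat) : Int) = (((j : Nat) : Nat) : Int) from rfl, PySem.List.pyGet?_natCast]
    rw [show j = (List.replicate (c + 1) (0 : Int)).length + (j - c - 1) by simp; omega]
    rw [List.getElem?_append_right (by simp)]
    simp only [List.length_replicate, Nat.add_sub_cancel_left]
    rw [ghostG_getElem? arr k m (j - c - 1) (by omega)]
    rw [show m - (j - c - 1) = arr.length - j by omega,
      show arr.length - (c + 1 + (j - c - 1)) = arr.length - j by omega]
    rfl
  have hB := innerB_eq_innerA arr (memoM arr k m) (List.replicate (c + 1) 0 ++ ghostG arr k m)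
    (c : Int) k arr.length (by omega) hmem 1 0 0 (by omega)
  rw [hB, innerA_val arr k c m (by omega)]
  show (memoM arr k m).insert ((c : Nat) : Int) ((ghostG arr k (m + 1)).headD 0) = _
  have : memoM arr k (m + 1)
      = (memoM arr k m).insert ((arr.length : Int) - (m + 1)) ((ghostG arr k (m + 1)).headD 0) := rfl
  rw [show arr.length - c = m + 1 by omega, this,
    show (arr.length : Int) - ((m : Int) + 1) = ((c : Nat) : Int) by omega]

-- the ascent: with states c..n memoized and stack [c-1,…,0], the machine finishes the table
theorem B_ascent (arr : List Int) (k : Int) :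
    ∀ (c : Nat) (fuel : Nat), c ≤ arr.length → c ≤ fuel →
    loopB arr (arr.length : Int) k fuel (memoM arr k (arr.length - c)) (stackOf c)
      = memoM arr k arr.length := by
  intro c
  induction c with
  | zero =>
    intro fuel _ _
    cases fuel <;> simp [loopB, stackOf, show arr.length - 0 = arr.length by omega]
  | succ c ih =>
    intro fuel hc hf
    obtain ⟨f, rfl⟩ : ∃ f, fuel = f + 1 := ⟨fuel - 1, by omega⟩
    show loopB arr (arr.length : Int) k (f + 1) (memoM arr k (arr.length - (c + 1))) ((c : Int) :: stackOf c)
      = memoM arr k arr.length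
    rw [loopB]
    rw [if_neg (by
      rw [contains_memoM]
      simp only [decide_eq_true_eq, not_and, not_le]
      intro h; omega)]
    rw [if_neg (by
      rw [contains_memoM]
      simp only [decide_eq_true_eq, not_not]
      omega)]
    have := B_compute arr k c (by omega)
    rw [show arr.length - c - 1 = arr.length - (c + 1) by omega] at this
    rw [this]
    exact ih f (by omega) (by omega)

-- the descent: from {n:0} and stack [j,…,0], the machine pushes up to n-1 and then ascends
theorem B_descent (arr : List Int) (k : Int) :
    ∀ (d j : Nat) (fuel : Nat), arr.length - 1 - j = d → j + 1 ≤ arr.length →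
    (arr.length - j) + arr.length ≤ fuel →
    loopB arr (arr.length : Int) k fuel (memoM arr k 0) (stackOf (j + 1))
      = memoM arr k arr.length := by
  intro d
  induction d with
  | zero =>
    intro j fuel hd hj hf
    have hjn : j = arr.length - 1 := by omega
    subst hjn
    obtain ⟨f, rfl⟩ : ∃ f, fuel = f + 1 := ⟨fuel - 1, by omega⟩
    show loopB arr (arr.length : Int) k (f + 1) (memoM arr k 0)
        (((arr.length - 1 : Nat) : Int) :: stackOf (arr.length - 1)) = memoM arr k arr.length
    rw [loopB]
    rw [if_neg (by
      rw [contains_memoM]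
      simp only [decide_eq_true_eq, not_and, not_le]
      push_cast
      intro h; omega)]
    rw [if_neg (by
      rw [contains_memoM]
      simp only [decide_eq_true_eq, not_not]
      omega)]
    have := B_compute arr k (arr.length - 1) (by omega)
    rw [show arr.length - (arr.length - 1) - 1 = 0 by omega,
        show arr.length - (arr.length - 1) = 1 by omega] at this
    rw [this]
    have := B_ascent arr k (arr.length - 1) f (by omega) (by omega)
    rw [show arr.length - (arr.length - 1) = 1 by omega] at this
    exact this
  | succ d ih =>
    intro j fuel hd hj hf
    obtain ⟨f, rfl⟩ : ∃ f, fuel = f + 1 := ⟨fuel - 1, by omega⟩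
    show loopB arr (arr.length : Int) k (f + 1) (memoM arr k 0) ((j : Int) :: stackOf (j + 1 - 1))
      = memoM arr k arr.length
    rw [show j + 1 - 1 = j by omega, loopB]
    rw [if_neg (by
      rw [contains_memoM]
      simp only [decide_eq_true_eq, not_and, not_le]
      push_cast
      intro h; omega)]
    rw [if_pos (by
      rw [contains_memoM]
      simp only [decide_eq_true_eq]
      omega)]
    have hstack : ((j : Int) + 1) :: (j : Int) :: stackOf j = stackOf (j + 2) := by
      show _ = ((j + 1 : Nat) : Int) :: stackOf (j + 1)
      push_cast
      rfl
    rw [hstack]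
    exact ih (j + 1) f (by omega) (by omega) (by omega)

-- B returns the head of the full ghost table
theorem B_result (arr : List Int) (k : Int) :
    maxSumTabForward_alt arr k = (ghostG arr k arr.length).headD 0 := by
  show (loopB arr (arr.length : Int) k (2 * arr.length + 2)
      ((PySem.Dict.empty : PySem.Dict Int Int).insert (arr.length : Int) 0) [0]).getD 0 0 = _
  have hm0 : (PySem.Dict.empty : PySem.Dict Int Int).insert (arr.length : Int) 0 = memoM arr k 0 := rfl
  rw [hm0]
  have hfinal : loopB arr (arr.length : Int) k (2 * arr.length + 2) (memoM arr k 0) [0]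
      = memoM arr k arr.length := by
    by_cases hn : arr.length = 0
    · rw [hn]
      show loopB arr ((0 : Nat) : Int) k (1 + 1) (memoM arr k 0) [0] = memoM arr k 0
      rw [loopB, if_pos (by
        rw [contains_memoM]
        simp only [decide_eq_true_eq]
        omega)]
      rfl
    · have h0 : ([0] : List Int) = stackOf (0 + 1) := rfl
      rw [h0]
      exact B_descent arr k (arr.length - 1) 0 (2 * arr.length + 2) (by omega) (by omega) (by omega)
  rw [hfinal]
  have := getD_memoM arr k arr.length 0 (by omega) (by omega)
  rw [show arr.length - 0 = arr.length by omega] at this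
  exact_mod_cast this

-- ===== VERDICT (by name: the statement is the Claim_ definition above) =====
theorem maxSumTabForward_spec : Claim_equal_maxSumTabForward := by
  intro arr k _
  unfold Spec_maxSumTabForward
  rw [A_result, B_result]
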